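-- pv_equiv track=rewrite | github.com/unknownman2024/bms-interest-tracker | usa2.py | extract_language
-- ===== SOURCE A (Python) =====
-- KNOWN_LANGUAGES = [
--     "English","Hindi","Tamil","Telugu","Kannada",
--     "Malayalam","Punjabi","Gujarati","Marathi","Bengali",
-- ]
--
-- def extract_language(amenities):
--     lang_priority = []
--     for item in amenities:
--         lowered = item.lower()
--         for lang in KNOWN_LANGUAGES:
--             if f"{lang.lower()} language" in lowered:
--                 return lang
--             if lang.lower() in lowered:
--                 lang_priority.append((lang, lowered.find(lang.lower())))
--     if lang_priority:
--         lang_priority.sort(key=lambda x: x[1])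
--         return lang_priority[0][0]
--     return "Unknown"
-- ===== SOURCE B (Python) =====
-- KNOWN_LANGUAGES = [
--     "English","Hindi","Tamil","Telugu","Kannada",
--     "Malayalam","Punjabi","Gujarati","Marathi","Bengali",
-- ]
--
-- def extract_language(amenities):
--     lowers = [item.lower() for item in amenities]
--     # stage 1: first "<lang> language" hit anywhere (item-major, language-minor order)
--     for lowered in lowers:
--         for lang in KNOWN_LANGUAGES:
--             if lang.lower() + " language" in lowered:
--                 return lang
--     # stage 2: all plain mentions, earliest-position one wins (min is the first minimal)
--     matches = [(lang, lowered.find(lang.lower()))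
--                for lowered in lowers
--                for lang in KNOWN_LANGUAGES
--                if lang.lower() in lowered]
--     if matches:
--         return min(matches, key=lambda t: t[1])[0]
--     return "Unknown"
-- ===== Notes on version B (the rewrite author's own statement) =====
-- stated objective: simpler
-- what changed: Replaces A's single interleaved loop that accumulates a (lang, position) list and finally stable-sorts it, by two staged passes: one scan of the lowered items for any '<lang> language' hit (early return), then a flat list comprehension of all plain mentions reduced with min(key=position), whose first-minimal tie-break reproduces the stable sort's head; the accumulator and the sort disappear.
import Mathlib
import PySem

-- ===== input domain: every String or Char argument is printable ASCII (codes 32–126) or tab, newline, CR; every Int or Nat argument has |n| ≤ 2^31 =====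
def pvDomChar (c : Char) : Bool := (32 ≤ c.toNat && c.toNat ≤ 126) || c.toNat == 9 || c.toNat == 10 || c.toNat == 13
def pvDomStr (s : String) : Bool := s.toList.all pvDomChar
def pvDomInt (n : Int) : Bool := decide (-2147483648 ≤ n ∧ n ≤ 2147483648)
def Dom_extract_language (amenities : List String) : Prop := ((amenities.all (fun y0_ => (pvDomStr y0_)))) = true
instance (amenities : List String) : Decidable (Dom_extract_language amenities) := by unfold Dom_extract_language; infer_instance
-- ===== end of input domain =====

-- B replaces A's single interleaved loop (accumulating a (lang, position) list, then a stable
-- sort and head lookup) by two staged passes: one scan for any "<lang> language" hit, then a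
-- flat comprehension of all plain mentions reduced by min-with-key (objective: simpler).

def knownLanguages : List String :=
  ["English","Hindi","Tamil","Telugu","Kannada",
   "Malayalam","Punjabi","Gujarati","Marathi","Bengali"]

-- ===== PORT A =====
-- inner 'for lang in KNOWN_LANGUAGES' loop: early return as `some lang`, else the grown lang_priority
def innerA : List String → List Char → List (String × Int) → Option String × List (String × Int)
  | [], _, lp => (none, lp)
  | lang :: rest, lowered, lp =>
    let ll := PySem.Chars.lower lang.toList
    if PySem.Chars.isIn (ll ++ " language".toList) lowered then (some lang, lp)
    else if PySem.Chars.isIn ll lowered then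
      innerA rest lowered (lp ++ [(lang, PySem.Chars.find lowered ll)])
    else innerA rest lowered lp

-- outer 'for item in amenities' loop, then sort lang_priority by position and take the head
def outerA : List String → List (String × Int) → String
  | [], lp =>
    match lp with
    | [] => "Unknown"
    | _ => ((PySem.List.sorted lp (fun x => x.2)).headD ("", 0)).1
  | item :: rest, lp =>
    let lowered := PySem.Chars.lower item.toList
    match innerA knownLanguages lowered lp with
    | (some lang, _) => lang
    | (none, lp') => outerA rest lp'

def extract_language (amenities : List String) : String := outerA amenities []

-- ===== PORT B =====
-- stage 1: first language with "<lang> language" inside one lowered item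
def phase1Langs : List String → List Char → Option String
  | [], _ => none
  | lang :: rest, lowered =>
    if PySem.Chars.isIn (PySem.Chars.lower lang.toList ++ " language".toList) lowered
    then some lang
    else phase1Langs rest lowered

-- stage 1: scan the lowered items for the first such hit
def phase1 : List (List Char) → Option String
  | [] => none
  | lowered :: rest =>
    match phase1Langs knownLanguages lowered with
    | some lang => some lang
    | none => phase1 rest

-- stage 2: all plain mentions in one lowered item, as (lang, position)
def plainMatches (lowered : List Char) : List (String × Int) :=
  knownLanguages.filterMap (fun lang =>
    let ll := PySem.Chars.lower lang.toList
    if PySem.Chars.isIn ll lowered then some (lang, PySem.Chars.find lowered ll) else none)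

def extract_language_alt (amenities : List String) : String :=
  let lowers := amenities.map (fun item => PySem.Chars.lower item.toList)
  match phase1 lowers with
  | some lang => lang
  | none =>
    match PySem.List.min? (lowers.flatMap plainMatches) (fun t => t.2) with
    | some t => t.1
    | none => "Unknown"

-- ===== PRECONDITION & SPEC =====
def Spec_extract_language (amenities : List String) (out : String) : Prop := out = extract_language_alt amenities
instance (amenities : List String) (out : String) : Decidable (Spec_extract_language amenities out) := by unfold Spec_extract_language; infer_instance

-- ===== CLAIM (what is proved, stated in full; the proofs are below) =====
def Claim_equal_extract_language : Prop := ∀ (amenities : List String), Dom_extract_language amenities → Spec_extract_language amenities (extract_language amenities)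

-- ===== LEMMAS AND PROOFS =====

-- the strict-< running argmin (= Python min-with-key's fold, first minimal wins)
def updMin (b : Option (String × Int)) (x : String × Int) : Option (String × Int) :=
  match b with
  | none => some x
  | some y => if x.2 < y.2 then some x else some y

def minOf (lp : List (String × Int)) : Option (String × Int) := lp.foldl updMin none

theorem min?_eq_minOf (lp : List (String × Int)) :
    PySem.List.min? lp (fun t => t.2) = minOf lp := by
  unfold PySem.List.min? minOf
  congr 1
  funext acc x
  cases acc <;> rfl

theorem foldl_updMin_isSome (l : List (String × Int)) (b : String × Int) :
    (l.foldl updMin (some b)).isSome := by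
  induction l generalizing b with
  | nil => rfl
  | cons x t ih =>
    simp only [List.foldl_cons, updMin]
    split <;> exact ih _

theorem head?_insertBy (x : String × Int) (acc : List (String × Int)) :
    (PySem.List.insertBy (fun a b => decide (a.2 < b.2)) x acc).head? = updMin acc.head? x := by
  cases acc with
  | nil => rfl
  | cons y ys =>
    simp only [PySem.List.insertBy, updMin, List.head?_cons]
    split <;> simp_all

theorem head?_foldl_insertBy (xs : List (String × Int)) (acc : List (String × Int)) :
    (xs.foldl (fun a x => PySem.List.insertBy (fun a b => decide (a.2 < b.2)) x a) acc).head? =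
      xs.foldl updMin acc.head? := by
  induction xs generalizing acc with
  | nil => rfl
  | cons x t ih =>
    simp only [List.foldl_cons]
    rw [ih, head?_insertBy]

theorem sorted_head?_eq_minOf (lp : List (String × Int)) :
    (PySem.List.sorted lp (fun x => x.2)).head? = minOf lp := by
  rw [PySem.List.sorted_eq_foldl_insertBy]
  exact head?_foldl_insertBy lp []

-- plainMatches restricted to an arbitrary language list (proof generalization)
def plainOn (langs : List String) (lowered : List Char) : List (String × Int) :=
  langs.filterMap (fun lang =>
    let ll := PySem.Chars.lower lang.toList
    if PySem.Chars.isIn ll lowered then some (lang, PySem.Chars.find lowered ll) else none)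

theorem innerA_fst (langs : List String) (lowered : List Char) (lp : List (String × Int)) :
    (innerA langs lowered lp).1 = phase1Langs langs lowered := by
  induction langs generalizing lp with
  | nil => rfl
  | cons lang rest ih =>
    simp only [innerA, phase1Langs]
    split
    · rfl
    · split <;> exact ih _

theorem innerA_snd (langs : List String) (lowered : List Char) (lp : List (String × Int))
    (h : phase1Langs langs lowered = none) :
    (innerA langs lowered lp).2 = lp ++ plainOn langs lowered := by
  induction langs generalizing lp with
  | nil => simp [innerA, plainOn]
  | cons lang rest ih =>
    simp only [phase1Langs] at h
    simp only [innerA, plainOn, List.filterMap_cons]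
    cases h1 : PySem.Chars.isIn (PySem.Chars.lower lang.toList ++ " language".toList) lowered with
    | true => rw [h1] at h; simp at h
    | false =>
      rw [h1] at h
      simp only [Bool.false_eq_true, if_false] at h ⊢
      cases h2 : PySem.Chars.isIn (PySem.Chars.lower lang.toList) lowered with
      | true =>
        simp only [if_true]
        rw [ih _ h]
        simp [plainOn, List.append_assoc]
      | false =>
        simp only [Bool.false_eq_true, if_false]
        exact ih _ h

-- A's whole loop, characterized against B's two stages
theorem outerA_eq (items : List String) (lp : List (String × Int)) :
    outerA items lp =
      match phase1 (items.map (fun item => PySem.Chars.lower item.toList)) with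
      | some lang => lang
      | none =>
        match minOf (lp ++ (items.map (fun item => PySem.Chars.lower item.toList)).flatMap plainMatches) with
        | some y => y.1
        | none => "Unknown" := by
  induction items generalizing lp with
  | nil =>
    simp only [List.map_nil, phase1, List.flatMap_nil, List.append_nil, outerA]
    cases hlp : lp with
    | nil => rfl
    | cons x t =>
      have hsome : (minOf (x :: t)).isSome := by
        simp only [minOf, List.foldl_cons, updMin]
        exact foldl_updMin_isSome t x
      cases hm : minOf (x :: t) with
      | none => rw [hm] at hsome; exact absurd hsome (by simp)
      | some y =>
        have hh : (PySem.List.sorted (x :: t) (fun p => p.2)).head? = some y := by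
          rw [sorted_head?_eq_minOf, hm]
        cases hs : PySem.List.sorted (x :: t) (fun p => p.2) with
        | nil => rw [hs] at hh; exact absurd hh (by simp)
        | cons z zs =>
          rw [hs] at hh
          simp only [List.head?_cons, Option.some_inj] at hh
          simp [hh]
  | cons item rest ih =>
    simp only [List.map_cons, phase1, List.flatMap_cons, outerA]
    cases h : phase1Langs knownLanguages (PySem.Chars.lower item.toList) with
    | some lang =>
      have h1 := innerA_fst knownLanguages (PySem.Chars.lower item.toList) lp
      rw [h] at h1
      cases ha : innerA knownLanguages (PySem.Chars.lower item.toList) lp with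
      | mk o l2 =>
        rw [ha] at h1; simp only at h1; subst h1; rfl
    | none =>
      have h1 := innerA_fst knownLanguages (PySem.Chars.lower item.toList) lp
      have h2 := innerA_snd knownLanguages (PySem.Chars.lower item.toList) lp h
      rw [h] at h1
      cases ha : innerA knownLanguages (PySem.Chars.lower item.toList) lp with
      | mk o l2 =>
        rw [ha] at h1 h2; simp only at h1 h2; subst h1; subst h2
        have hpm : plainOn knownLanguages (PySem.Chars.lower item.toList) =
            plainMatches (PySem.Chars.lower item.toList) := rfl
        show outerA rest (lp ++ plainOn knownLanguages (PySem.Chars.lower item.toList)) = _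
        rw [ih, hpm, List.append_assoc]

-- ===== VERDICT (by name: the statement is the Claim_ definition above) =====
theorem extract_language_spec : Claim_equal_extract_language := by
  intro amenities _
  show extract_language amenities = extract_language_alt amenities
  unfold extract_language extract_language_alt
  rw [outerA_eq]
  simp only [List.nil_append, min?_eq_minOf]
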